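-- pv_equiv track=rewrite | github.com/siddhantmedar/LeetCode | 1385-find-the-distance-value-between-two-arrays/1385-find-the-distance-value-between-two-arrays.py | findTheDistanceValue
-- ===== SOURCE A (Python) =====
-- from typing import List
--
-- def findTheDistanceValue(arr1: List[int], arr2: List[int], d: int) -> int:
--     count = 0
--
--     for ele1 in arr1:
--         first_time = True
--         for ele2 in arr2:
--             if abs(ele1-ele2) <= d:
--                 if first_time:
--                     count+=1
--                     first_time = False
--
--     return len(arr1)-count
-- ===== SOURCE B (Python) =====
-- from typing import List
--
-- def findTheDistanceValue(arr1: List[int], arr2: List[int], d: int) -> int: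
--     a = sorted(arr2)
--     n = len(a)
--     res = 0
--     for x in arr1:
--         # bisect_left(a, x - d), hand-written (A imports no bisect)
--         t = x - d
--         lo, hi = 0, n
--         while lo < hi:
--             mid = (lo + hi) // 2
--             if a[mid] < t:
--                 lo = mid + 1
--             else:
--                 hi = mid
--         if lo == n or a[lo] > x + d:
--             res += 1
--     return res
-- ===== Notes on version B (the rewrite author's own statement) =====
-- stated objective: faster
-- what changed: Replaces the nested scan of arr2 for every arr1 element by one sort of arr2 plus a per-element binary search for the half-open range [x-d, x+d].
import Mathlib
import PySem

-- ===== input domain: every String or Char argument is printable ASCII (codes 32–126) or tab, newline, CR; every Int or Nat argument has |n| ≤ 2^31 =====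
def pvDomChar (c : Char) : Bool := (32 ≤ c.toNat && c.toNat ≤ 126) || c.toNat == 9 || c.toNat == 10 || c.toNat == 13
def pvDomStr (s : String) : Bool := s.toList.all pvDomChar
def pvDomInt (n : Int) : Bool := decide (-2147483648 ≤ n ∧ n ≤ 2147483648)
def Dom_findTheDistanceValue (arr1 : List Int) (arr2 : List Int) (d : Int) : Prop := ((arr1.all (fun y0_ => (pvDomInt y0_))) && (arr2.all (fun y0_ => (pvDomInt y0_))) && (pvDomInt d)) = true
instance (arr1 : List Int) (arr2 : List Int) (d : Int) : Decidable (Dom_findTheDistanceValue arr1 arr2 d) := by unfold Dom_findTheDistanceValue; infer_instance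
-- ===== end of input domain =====

-- B replaces A's nested scan of arr2 per arr1 element by sorting arr2 once and binary-searching
-- the range [x-d, x+d] per element (faster: asymptotic, O((n+m) log m) vs O(n*m)).

-- ===== PORT A =====
-- literal transliteration: outer fold carries count, inner fold carries (count, first_time)
def findTheDistanceValue (arr1 : List Int) (arr2 : List Int) (d : Int) : Int :=
  let count : Int := arr1.foldl (fun count ele1 =>
    (arr2.foldl (fun (st : Int × Bool) ele2 =>
        if |ele1 - ele2| ≤ d then
          (if st.2 then (st.1 + 1, false) else st)
        else st)
      (count, true)).1) 0
  (arr1.length : Int) - count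

-- ===== PORT B =====
-- Source B's hand-written lo/hi/mid binary-search loop is exactly PySem.List.bisectLeft's loop;
-- a[lo] is only read when lo < n, so getD is exact there.
def findTheDistanceValue_alt (arr1 : List Int) (arr2 : List Int) (d : Int) : Int :=
  let a := PySem.List.sorted arr2 (fun x => x) false
  let n := a.length
  arr1.foldl (fun res x =>
    let lo := PySem.List.bisectLeft a (x - d)
    if lo = n ∨ a.getD lo 0 > x + d then res + 1 else res) 0

-- ===== PRECONDITION & SPEC =====
def Spec_findTheDistanceValue (arr1 : List Int) (arr2 : List Int) (d : Int) (out : Int) : Prop := out = findTheDistanceValue_alt arr1 arr2 d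
instance (arr1 : List Int) (arr2 : List Int) (d : Int) (out : Int) : Decidable (Spec_findTheDistanceValue arr1 arr2 d out) := by unfold Spec_findTheDistanceValue; infer_instance

-- ===== CLAIM (what is proved, stated in full; the proofs are below) =====
def Claim_equal_findTheDistanceValue : Prop := ∀ (arr1 : List Int) (arr2 : List Int) (d : Int), Dom_findTheDistanceValue arr1 arr2 d → Spec_findTheDistanceValue arr1 arr2 d (findTheDistanceValue arr1 arr2 d)


-- ===== LEMMAS AND PROOFS =====

-- A's inner loop over arr2: bumps the count exactly once iff some element is within d
theorem innerA_char (x d : Int) (l : List Int) (c : Int) (b : Bool) :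
    l.foldl (fun (st : Int × Bool) y =>
        if |x - y| ≤ d then (if st.2 then (st.1 + 1, false) else st) else st) (c, b)
      = if b = true ∧ ∃ y ∈ l, |x - y| ≤ d then (c + 1, false) else (c, b) := by
  induction l generalizing c b with
  | nil => simp
  | cons h t ih =>
      simp only [List.foldl_cons]
      by_cases hm : |x - h| ≤ d
      · cases b with
        | false => simp [hm, ih]
        | true => simp [hm, ih]
      · simp [hm, ih]

-- B's per-element test decides "no arr2 element within d"
theorem testB_char (arr2 : List Int) (x d : Int) :
    (PySem.List.bisectLeft (PySem.List.sorted arr2 (fun x => x) false) (x - d)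
        = (PySem.List.sorted arr2 (fun x => x) false).length ∨
      (PySem.List.sorted arr2 (fun x => x) false).getD
        (PySem.List.bisectLeft (PySem.List.sorted arr2 (fun x => x) false) (x - d)) 0 > x + d)
      ↔ ¬ ∃ y ∈ arr2, |x - y| ≤ d := by
  set a := PySem.List.sorted arr2 (fun x => x) false with ha
  set lo := PySem.List.bisectLeft a (x - d) with hlo
  have hpw : a.Pairwise (fun p q => p ≤ q) := PySem.List.sorted_pairwise (xs := arr2) (key := fun x => x)
  obtain ⟨hle, hbelow, habove⟩ := PySem.List.bisectLeft_spec a (x - d) hpw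
  rw [← hlo] at hle hbelow habove
  have hmem : ∀ y : Int, y ∈ a ↔ y ∈ arr2 := fun y => PySem.List.mem_sorted arr2 (fun x => x) false y
  constructor
  · rintro hcond ⟨y, hy, hyd⟩
    rw [← hmem] at hy
    obtain ⟨j, hj, rfl⟩ := List.mem_iff_getElem.mp hy
    have habs := abs_le.mp hyd
    have hjlo : lo ≤ j := by
      by_contra hc
      exact absurd (hbelow j hj (by omega)) (by omega)
    have hlon : lo < a.length := lt_of_le_of_lt hjlo hj
    have hne : lo ≠ a.length := by omega
    have hmono : a[lo]'hlon ≤ a[j] := by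
      have := PySem.List.sorted_id_getElem_mono (xs := arr2) hjlo hj
      simpa [← ha] using this
    have hgd : a.getD lo 0 = a[lo]'hlon := List.getD_eq_getElem a 0 hlon
    rcases hcond with h | h
    · exact hne h
    · rw [hgd] at h; omega
  · intro hno
    by_contra hcond
    push Not at hcond
    obtain ⟨hne, hle2⟩ := hcond
    have hlon : lo < a.length := lt_of_le_of_ne hle hne
    have hgd : a.getD lo 0 = a[lo]'hlon := List.getD_eq_getElem a 0 hlon
    have h1 : x - d ≤ a[lo]'hlon := habove lo hlon le_rfl
    refine hno ⟨a[lo]'hlon, (hmem _).mp (a.getElem_mem hlon), ?_⟩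
    rw [hgd] at hle2
    rw [abs_le]; omega

-- a counting fold equals the filtered length
theorem foldl_count (p : Int → Prop) [DecidablePred p] (l : List Int) (r : Int) :
    l.foldl (fun res x => if p x then res + 1 else res) r
      = r + ((l.filter (fun x => decide (p x))).length : Int) := by
  induction l generalizing r with
  | nil => simp
  | cons h t ih =>
      simp only [List.foldl_cons, List.filter_cons]
      by_cases hm : p h
      · simp [hm, ih]; omega
      · simp [hm, ih]

-- A's outer fold counts the matched elements
theorem foldA_char (arr2 : List Int) (d : Int) (l : List Int) (c : Int) :
    l.foldl (fun count ele1 =>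
        (arr2.foldl (fun (st : Int × Bool) ele2 =>
            if |ele1 - ele2| ≤ d then (if st.2 then (st.1 + 1, false) else st) else st)
          (count, true)).1) c
      = c + ((l.filter (fun x => decide (∃ y ∈ arr2, |x - y| ≤ d))).length : Int) := by
  induction l generalizing c with
  | nil => simp
  | cons h t ih =>
      simp only [List.foldl_cons, List.filter_cons]
      rw [innerA_char]
      by_cases hm : ∃ y ∈ arr2, |h - y| ≤ d
      · simp [hm, ih]; omega
      · simp [hm, ih]

-- ===== VERDICT (by name: the statement is the Claim_ definition above) =====
theorem findTheDistanceValue_spec : Claim_equal_findTheDistanceValue := by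
  intro arr1 arr2 d _
  unfold Spec_findTheDistanceValue findTheDistanceValue findTheDistanceValue_alt
  simp only []
  rw [foldA_char,
    foldl_count (fun x => PySem.List.bisectLeft (PySem.List.sorted arr2 (fun x => x) false) (x - d)
        = (PySem.List.sorted arr2 (fun x => x) false).length ∨
      (PySem.List.sorted arr2 (fun x => x) false).getD
        (PySem.List.bisectLeft (PySem.List.sorted arr2 (fun x => x) false) (x - d)) 0 > x + d)]
  have hfc : List.filter (fun x =>
      decide (PySem.List.bisectLeft (PySem.List.sorted arr2 (fun x => x) false) (x - d)
          = (PySem.List.sorted arr2 (fun x => x) false).length ∨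
        (PySem.List.sorted arr2 (fun x => x) false).getD
          (PySem.List.bisectLeft (PySem.List.sorted arr2 (fun x => x) false) (x - d)) 0 > x + d)) arr1
      = List.filter (fun x => !decide (∃ y ∈ arr2, |x - y| ≤ d)) arr1 :=
    List.filter_congr (fun x _ => by
      simp only [← decide_not]
      exact decide_eq_decide.mpr (testB_char arr2 x d))
  rw [hfc]
  have := List.length_eq_length_filter_add (l := arr1) (fun x => decide (∃ y ∈ arr2, |x - y| ≤ d))
  omega
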